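-- pv_equiv track=rewrite | github.com/nioelumijkee/sss | toss.py | print_list
-- ===== SOURCE A (Python) =====
-- def print_list(l):
--     "print list"
--     s = ''
--     for i in l:
--         s = s + ' ' + i
--         if len(s) > 80:
--             s = s[:74]
--             s = s + ' >'
--             break
--     return(s.strip())
-- ===== SOURCE B (Python) =====
-- def print_list(l):
--     "print list"
--     s = ' ' + ' '.join(l)
--     if len(s) > 80:
--         s = s[:74] + ' >'
--     return s.strip()
-- ===== Notes on version B (the rewrite author's own statement) =====
-- stated objective: idiomatic
-- what changed: Replaces the item-by-item concatenation loop with its in-loop early-break truncation branch by a straight-line build: join the whole list once, then a single post-hoc truncation check before stripping.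
import Mathlib
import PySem

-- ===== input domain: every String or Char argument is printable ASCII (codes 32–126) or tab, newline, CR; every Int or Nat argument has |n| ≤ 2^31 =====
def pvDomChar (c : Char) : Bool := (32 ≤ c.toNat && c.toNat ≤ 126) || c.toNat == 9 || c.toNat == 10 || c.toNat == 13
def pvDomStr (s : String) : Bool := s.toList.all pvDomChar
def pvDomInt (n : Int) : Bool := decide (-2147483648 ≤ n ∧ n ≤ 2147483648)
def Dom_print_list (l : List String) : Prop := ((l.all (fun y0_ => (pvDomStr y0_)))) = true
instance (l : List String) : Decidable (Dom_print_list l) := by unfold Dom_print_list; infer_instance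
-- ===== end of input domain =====

-- B builds the whole joined string once and truncates post hoc, replacing A's
-- concatenation loop with its in-loop early-break truncation branch (objective: idiomatic).


-- ===== PORT A =====
-- the loop: s = s + ' ' + i; if len(s) > 80: s = s[:74]; s = s + ' >'; break
def print_list_loop : List String → List Char → List Char
  | [], s => s
  | i :: rest, s =>
    let s' := s ++ [' '] ++ i.toList
    if 80 < s'.length then
      (PySem.Chars.slice s' none (some 74)) ++ [' ', '>']
    else
      print_list_loop rest s'

def print_list (l : List String) : String :=
  String.ofList (PySem.Chars.strip (print_list_loop l []))

-- ===== PORT B =====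
def print_list_alt (l : List String) : String :=
  let s : List Char := [' '] ++ PySem.Chars.join [' '] (l.map String.toList)
  let s := if 80 < s.length then (PySem.Chars.slice s none (some 74)) ++ [' ', '>'] else s
  String.ofList (PySem.Chars.strip s)

-- ===== PRECONDITION & SPEC =====
def Spec_print_list (l : List String) (out : String) : Prop := out = print_list_alt l
instance (l : List String) (out : String) : Decidable (Spec_print_list l out) := by unfold Spec_print_list; infer_instance

-- ===== CLAIM (what is proved, stated in full; the proofs are below) =====
def Claim_equal_print_list : Prop := ∀ (l : List String), Dom_print_list l → Spec_print_list l (print_list l)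

-- ===== LEMMAS AND PROOFS =====

-- the full concatenation chain s + ' ' + i0 + ' ' + i1 + …
def pvFull (c : List Char) (l : List String) : List Char :=
  l.foldl (fun s i => s ++ [' '] ++ i.toList) c

theorem pvFull_nil (c : List Char) : pvFull c [] = c := rfl

theorem pvFull_prefix (l : List String) (c : List Char) : c <+: pvFull c l := by
  induction l generalizing c with
  | nil => exact List.prefix_rfl
  | cons i rest ih =>
      exact List.IsPrefix.trans (by simp) (ih (c ++ [' '] ++ i.toList))

-- the chain over a shifted start is the start followed by the chain from nothing
theorem pvFull_shift (xs : List String) (c : List Char) : pvFull c xs = c ++ pvFull [] xs := by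
  induction xs generalizing c with
  | nil => simp [pvFull]
  | cons x xs ihx =>
      show pvFull (c ++ [' '] ++ x.toList) xs = c ++ pvFull ([] ++ [' '] ++ x.toList) xs
      rw [ihx, ihx ([] ++ [' '] ++ x.toList)]
      simp

-- B's joined string is exactly the full chain (for a nonempty list)
theorem pvJoin_eq_full (i : String) (t : List String) :
    [' '] ++ PySem.Chars.join [' '] ((i :: t).map String.toList) = pvFull [] (i :: t) := by
  induction t generalizing i with
  | nil =>
      show [' '] ++ PySem.Chars.join [' '] [i.toList] = pvFull [] [i]
      rw [PySem.Chars.join_singleton]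
      rfl
  | cons j t ih =>
      simp only [List.map_cons, PySem.Chars.join_cons_cons] at ih ⊢
      have h2 : pvFull [] (i :: j :: t) = pvFull ([] ++ [' '] ++ i.toList) (j :: t) := rfl
      rw [h2, pvFull_shift (j :: t) ([] ++ [' '] ++ i.toList), ← ih j]
      simp

-- the loop computes the post-hoc truncation of the full chain
theorem pvLoop_eq (l : List String) (c : List Char) (hc : c.length ≤ 80) :
    print_list_loop l c =
      (if 80 < (pvFull c l).length
       then (pvFull c l).take 74 ++ [' ', '>']
       else pvFull c l) := by
  induction l generalizing c with
  | nil => simp [print_list_loop, pvFull_nil, Nat.not_lt.mpr hc]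
  | cons i rest ih =>
      have hfull : pvFull c (i :: rest) = pvFull (c ++ [' '] ++ i.toList) rest := rfl
      show (if 80 < (c ++ [' '] ++ i.toList).length
            then (PySem.Chars.slice (c ++ [' '] ++ i.toList) none (some 74)) ++ [' ', '>']
            else print_list_loop rest (c ++ [' '] ++ i.toList)) = _
      by_cases hb : 80 < (c ++ [' '] ++ i.toList).length
      · -- break: the first 74 chars of the full chain are fixed at the break point
        have hpre : (c ++ [' '] ++ i.toList) <+: pvFull c (i :: rest) :=
          hfull ▸ pvFull_prefix rest (c ++ [' '] ++ i.toList)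
        obtain ⟨d, hd⟩ := hpre
        have htake : (pvFull c (i :: rest)).take 74 = (c ++ [' '] ++ i.toList).take 74 := by
          rw [← hd, List.take_append_of_le_length (by omega)]
        have hlen : 80 < (pvFull c (i :: rest)).length := by
          have hb' := hb
          rw [← hd]; simp at hb' ⊢; omega
        have hslice : PySem.Chars.slice (c ++ [' '] ++ i.toList) none (some 74)
            = (c ++ [' '] ++ i.toList).take 74 := by
          exact_mod_cast PySem.List.slice_to_natCast (c ++ [' '] ++ i.toList) 74
        rw [if_pos hb, if_pos hlen, htake, hslice]
      · rw [if_neg hb, ih (c ++ [' '] ++ i.toList) (by omega), hfull]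

theorem pv_slice_full (l : List String) :
    PySem.Chars.slice (pvFull [] l) none (some 74) = (pvFull [] l).take 74 := by
  exact_mod_cast PySem.List.slice_to_natCast (pvFull [] l) 74

-- ===== VERDICT (by name: the statement is the Claim_ definition above) =====
theorem print_list_spec : Claim_equal_print_list := by
  intro l _
  unfold Spec_print_list print_list print_list_alt
  rcases eq_or_ne l [] with rfl | h
  · decide
  · obtain ⟨i, t, rfl⟩ := List.exists_cons_of_ne_nil h
    simp only [pvJoin_eq_full i t, pvLoop_eq (i :: t) [] (by simp), pv_slice_full]
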